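-- pv_equiv track=rewrite | github.com/zdan2/kyopro2 | abc/abc195/d.py | f
-- ===== SOURCE A (Python) =====
-- def f(a,b):
--     b=sorted(b)
--     dp=[0]*(len(b)+1)
--     for w,v in a:
--         for i in range(len(b)):
--             if w<=b[i] and v>dp[i+1]:
--                 dp[i+1]=v
--                 break
--     return sum(dp)
-- ===== SOURCE B (Python) =====
-- def f(a, b):
--     # Segment-tree of minima over the box values + binary search for the first
--     # box large enough: each item jumps to its feasible range and descends the
--     # tree to the leftmost slot whose current value is below its own.
--     bs = sorted(b)
--     n = len(bs)
--     if n == 0: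
--         return 0
--
--     def build(k):
--         if k == 1:
--             return ['L', 0]
--         m = k // 2
--         return ['N', 0, m, build(m), build(k - m)]
--
--     def find(t, lo, v, off):
--         # leftmost global index i >= lo with leaf value < v inside t (rooted at off), or -1
--         if t[1] >= v:
--             return -1
--         if t[0] == 'L':
--             return off if off >= lo else -1
--         m, l, r = t[2], t[3], t[4]
--         if lo < off + m:
--             res = find(l, lo, v, off)
--             if res != -1:
--                 return res
--         return find(r, lo, v, off + m)
--
--     def update(t, i, v, off):
--         if t[0] == 'L':
--             t[1] = v
--             return
--         m, l, r = t[2], t[3], t[4]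
--         if i < off + m:
--             update(l, i, v, off)
--         else:
--             update(r, i, v, off + m)
--         t[1] = min(l[1], r[1])
--
--     def total(t):
--         if t[0] == 'L':
--             return t[1]
--         return total(t[3]) + total(t[4])
--
--     root = build(n)
--     for w, v in a:
--         lo, hi = 0, n
--         while lo < hi:
--             mid = (lo + hi) // 2
--             if bs[mid] < w:
--                 lo = mid + 1
--             else:
--                 hi = mid
--         if lo < n:
--             i = find(root, lo, v, 0)
--             if i != -1:
--                 update(root, i, v, 0)
--     return total(root)
-- ===== Notes on version B (the rewrite author's own statement) =====
-- stated objective: faster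
-- what changed: Replaces A's per-item linear scan over all boxes (checking capacity and current value at every box) by a binary search for the first big-enough box plus a min-segment-tree descent to the leftmost improvable slot, with point updates.
import Mathlib
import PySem

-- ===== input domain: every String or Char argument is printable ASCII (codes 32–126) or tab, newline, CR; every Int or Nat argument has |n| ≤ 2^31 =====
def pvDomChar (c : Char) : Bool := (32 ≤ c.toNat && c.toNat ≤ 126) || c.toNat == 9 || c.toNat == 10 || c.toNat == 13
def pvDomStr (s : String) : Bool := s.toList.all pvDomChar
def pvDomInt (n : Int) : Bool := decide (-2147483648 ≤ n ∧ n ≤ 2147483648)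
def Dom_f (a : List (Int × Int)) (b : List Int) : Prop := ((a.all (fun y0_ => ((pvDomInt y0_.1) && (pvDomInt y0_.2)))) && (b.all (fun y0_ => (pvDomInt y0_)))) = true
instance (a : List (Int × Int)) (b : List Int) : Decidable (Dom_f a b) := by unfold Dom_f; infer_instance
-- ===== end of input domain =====

-- B replaces A's per-item linear scan over all boxes by a binary search for the first
-- big-enough box plus a min-segment-tree descent to the leftmost improvable slot:
-- O((|a|+|b|) log |b|) instead of O(|a|·|b|) (objective: faster).

-- ===== PORT A =====
-- A's inner `for i in range(len(b)): if w<=b[i] and v>dp[i+1]: dp[i+1]=v; break`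
-- as index recursion; dp.getD (i+1) 0 is exact: dp always has length bs.length+1, so i+1 is in range.
def fInner (bs : List Int) (w v : Int) (dp : List Int) (i : Nat) : List Int :=
  if h : i < bs.length then
    if w ≤ bs[i] ∧ v > dp.getD (i + 1) 0 then dp.set (i + 1) v
    else fInner bs w v dp (i + 1)
  else dp
termination_by bs.length - i

def f (a : List (Int × Int)) (b : List Int) : Int :=
  let bs := PySem.List.sorted b (fun x => x) false
  let dp := a.foldl (fun dp wv => fInner bs wv.1 wv.2 dp 0) (List.replicate (b.length + 1) 0)
  dp.sum

-- ===== PORT B =====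
-- segment tree node: cached minimum, size of the left subtree
inductive ST2 : Type where
  | leaf : Int → ST2
  | node : Int → Nat → ST2 → ST2 → ST2

def ST2.mnv : ST2 → Int
  | .leaf x => x
  | .node mn _ _ _ => mn

-- build(k): tree with k zero leaves (k ≥ 1)
def buildST (k : Nat) : ST2 :=
  if k ≤ 1 then .leaf 0
  else .node 0 (k / 2) (buildST (k / 2)) (buildST (k - k / 2))
termination_by k
decreasing_by all_goals omega

-- find(t, lo, v, off): leftmost global index ≥ lo with leaf value < v, else -1
def findST : ST2 → Nat → Int → Nat → Int
  | .leaf x, lo, v, off => if x ≥ v then -1 else if off ≥ lo then (off : Int) else -1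
  | .node mn m l r, lo, v, off =>
    if mn ≥ v then -1
    else
      let res := if lo < off + m then findST l lo v off else -1
      if res ≠ -1 then res else findST r lo v (off + m)

-- update(t, i, v, off): point assignment, recomputing cached minima
def updST : ST2 → Nat → Int → Nat → ST2
  | .leaf _, _, v, _ => .leaf v
  | .node _ m l r, i, v, off =>
    if i < off + m then
      let l' := updST l i v off
      .node (min l'.mnv r.mnv) m l' r
    else
      let r' := updST r i v (off + m)
      .node (min l.mnv r'.mnv) m l r'

def totST : ST2 → Int
  | .leaf x => x
  | .node _ _ l r => totST l + totST r

-- hand-written bisect_left; bs.getD mid 0 is exact: lo ≤ mid < hi ≤ bs.length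
def bisectL (bs : List Int) (w : Int) (lo hi : Nat) : Nat :=
  if lo < hi then
    if bs.getD ((lo + hi) / 2) 0 < w then bisectL bs w ((lo + hi) / 2 + 1) hi
    else bisectL bs w lo ((lo + hi) / 2)
  else lo
termination_by hi - lo
decreasing_by all_goals omega

def f_alt (a : List (Int × Int)) (b : List Int) : Int :=
  let bs := PySem.List.sorted b (fun x => x) false
  let n := bs.length
  if n = 0 then 0
  else
    let root := a.foldl (fun t wv =>
      let lo := bisectL bs wv.1 0 n
      if lo < n then
        let i := findST t lo wv.2 0
        if i ≠ -1 then updST t i.toNat wv.2 0 else t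
      else t) (buildST n)
    totST root

-- ===== PRECONDITION & SPEC =====
def Spec_f (a : List (Int × Int)) (b : List Int) (out : Int) : Prop := out = f_alt a b
instance (a : List (Int × Int)) (b : List Int) (out : Int) : Decidable (Spec_f a b out) := by unfold Spec_f; infer_instance

-- ===== CLAIM (what is proved, stated in full; the proofs are below) =====
def Claim_equal_f : Prop := ∀ (a : List (Int × Int)) (b : List Int), Dom_f a b → Spec_f a b (f a b)

-- ===== LEMMAS AND PROOFS =====

def ST2.toL : ST2 → List Int
  | .leaf x => [x]
  | .node _ _ l r => l.toL ++ r.toL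

def ST2.wf : ST2 → Prop
  | .leaf _ => True
  | .node mn m l r => l.wf ∧ r.wf ∧ m = l.toL.length ∧ mn = min l.mnv r.mnv

-- first (relative) index j with w ≤ bs[j] ∧ d[j] < v (the position where A's inner loop stops)
def scanI : List Int → List Int → Int → Int → Nat → Int
  | x :: bs', y :: d', w, v, off => if w ≤ x ∧ y < v then (off : Int) else scanI bs' d' w v (off + 1)
  | _, _, _, _, _ => -1

-- leftmost index ≥ lo with d value < v (what findST computes on toL)
def findSpecL : List Int → Nat → Int → Nat → Int
  | [], _, _, _ => -1
  | x :: d', lo, v, off => if lo ≤ off ∧ x < v then (off : Int) else findSpecL d' lo v (off + 1)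

-- ---- segment tree ↔ list lemmas ----

theorem totST_toL (t : ST2) : totST t = t.toL.sum := by
  induction t with
  | leaf x => simp [totST, ST2.toL]
  | node mn m l r ihl ihr => simp [totST, ST2.toL, ihl, ihr]

theorem mnv_le (t : ST2) (hw : t.wf) : ∀ x ∈ t.toL, t.mnv ≤ x := by
  induction t with
  | leaf x => simp [ST2.toL, ST2.mnv]
  | node mn m l r ihl ihr =>
    obtain ⟨hl, hr, -, hmn⟩ := hw
    intro x hx
    simp only [ST2.toL, List.mem_append] at hx
    simp only [ST2.mnv, hmn]
    rcases hx with hx | hx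
    · exact le_trans (min_le_left _ _) (ihl hl x hx)
    · exact le_trans (min_le_right _ _) (ihr hr x hx)

theorem findSpecL_all_ge {v : Int} : ∀ {d : List Int}, (∀ x ∈ d, v ≤ x) → ∀ lo off, findSpecL d lo v off = -1 := by
  intro d
  induction d with
  | nil => intro _ lo off; simp [findSpecL]
  | cons x d' ih =>
    intro h lo off
    have hx : v ≤ x := h x (by simp)
    simp only [findSpecL]
    rw [if_neg (by rintro ⟨-, h2⟩; omega)]
    exact ih (fun y hy => h y (by simp [hy])) lo (off + 1)

theorem findSpecL_out : ∀ (d : List Int) (lo : Nat) (v : Int) (off : Nat), d.length + off ≤ lo → findSpecL d lo v off = -1 := by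
  intro d
  induction d with
  | nil => intro lo v off _; simp [findSpecL]
  | cons x d' ih =>
    intro lo v off h
    simp only [List.length_cons] at h
    simp only [findSpecL]
    rw [if_neg (by rintro ⟨hlo, -⟩; omega)]
    exact ih lo v (off + 1) (by omega)

theorem findSpecL_append : ∀ (xs ys : List Int) (lo : Nat) (v : Int) (off : Nat),
    findSpecL (xs ++ ys) lo v off =
      if findSpecL xs lo v off ≠ -1 then findSpecL xs lo v off else findSpecL ys lo v (off + xs.length) := by
  intro xs
  induction xs with
  | nil => intro ys lo v off; simp [findSpecL]
  | cons x xs' ih =>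
    intro ys lo v off
    simp only [List.cons_append, findSpecL]
    by_cases hc : lo ≤ off ∧ x < v
    · rw [if_pos hc, if_pos hc, if_pos (show ((off : Nat) : Int) ≠ -1 by omega)]
    · rw [if_neg hc, if_neg hc, ih]
      simp only [List.length_cons]
      have h2 : off + 1 + xs'.length = off + (xs'.length + 1) := by omega
      rw [h2]

theorem findSpecL_bounds : ∀ (d : List Int) (lo : Nat) (v : Int) (off : Nat),
    findSpecL d lo v off ≠ -1 →
    ∃ j, j < d.length ∧ findSpecL d lo v off = ((off + j : Nat) : Int) := by
  intro d
  induction d with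
  | nil => intro lo v off h; simp [findSpecL] at h
  | cons x d' ih =>
    intro lo v off h
    simp only [findSpecL] at h ⊢
    by_cases hc : lo ≤ off ∧ x < v
    · exact ⟨0, by simp, by rw [if_pos hc]; simp⟩
    · rw [if_neg hc] at h ⊢
      obtain ⟨j, hj, hval⟩ := ih lo v (off + 1) h
      exact ⟨j + 1, by simp; omega, by rw [hval]; congr 1; omega⟩

theorem findST_eq (t : ST2) (hw : t.wf) : ∀ (lo : Nat) (v : Int) (off : Nat),
    findST t lo v off = findSpecL t.toL lo v off := by
  induction t with
  | leaf x =>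
    intro lo v off
    simp only [findST, ST2.toL, findSpecL]
    by_cases hx : x ≥ v
    · rw [if_pos hx, if_neg (show ¬(lo ≤ off ∧ x < v) by rintro ⟨-, h2⟩; omega)]
    · rw [if_neg hx]
      by_cases hlo : off ≥ lo
      · rw [if_pos hlo, if_pos ⟨hlo, by omega⟩]
      · rw [if_neg hlo, if_neg (show ¬(lo ≤ off ∧ x < v) by rintro ⟨h1, -⟩; omega)]
  | node mn m l r ihl ihr =>
    intro lo v off
    obtain ⟨hl, hr, hm, hmn⟩ := hw
    simp only [findST, ST2.toL]
    by_cases hge : mn ≥ v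
    · rw [if_pos hge]
      refine (findSpecL_all_ge ?_ lo off).symm
      intro x hx
      have := mnv_le (ST2.node mn m l r) ⟨hl, hr, hm, hmn⟩ x (by simpa [ST2.toL] using hx)
      simpa [ST2.mnv] using this.trans' hge
    · rw [if_neg hge, findSpecL_append]
      have hres : (if lo < off + m then findST l lo v off else -1) = findSpecL l.toL lo v off := by
        by_cases hlt : lo < off + m
        · rw [if_pos hlt]; exact ihl hl lo v off
        · rw [if_neg hlt]
          exact (findSpecL_out l.toL lo v off (by omega)).symm
      rw [hres, ← hm, ihr hr lo v (off + m)]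

theorem updST_toL_length : ∀ (t : ST2) (i : Nat) (v : Int) (off : Nat),
    (updST t i v off).toL.length = t.toL.length := by
  intro t
  induction t with
  | leaf x => intro i v off; simp [updST, ST2.toL]
  | node mn m l r ihl ihr =>
    intro i v off
    simp only [updST]
    by_cases hc : i < off + m
    · rw [if_pos hc]; simp [ST2.toL, ihl]
    · rw [if_neg hc]; simp [ST2.toL, ihr]

theorem updST_toL (t : ST2) (hw : t.wf) : ∀ (i : Nat) (v : Int) (off : Nat),
    off ≤ i → i < off + t.toL.length →
    (updST t i v off).toL = t.toL.set (i - off) v := by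
  induction t with
  | leaf x =>
    intro i v off h1 h2
    simp only [ST2.toL, List.length_cons, List.length_nil] at h2
    have : i - off = 0 := by omega
    simp [updST, ST2.toL, this]
  | node mn m l r ihl ihr =>
    intro i v off h1 h2
    obtain ⟨hl, hr, hm, -⟩ := hw
    simp only [ST2.toL, List.length_append] at h2
    simp only [updST]
    by_cases hc : i < off + m
    · rw [if_pos hc]
      simp only [ST2.toL]
      rw [ihl hl i v off h1 (by omega)]
      rw [List.set_append_left _ _ (by omega)]
    · rw [if_neg hc]
      simp only [ST2.toL]
      rw [ihr hr i v (off + m) (by omega) (by omega)]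
      rw [List.set_append_right _ _ (show l.toL.length ≤ i - off by omega)]
      have hidx : i - (off + m) = i - off - l.toL.length := by omega
      rw [hidx]

theorem updST_wf (t : ST2) (hw : t.wf) : ∀ (i : Nat) (v : Int) (off : Nat), (updST t i v off).wf := by
  induction t with
  | leaf x => intro i v off; simp [updST, ST2.wf]
  | node mn m l r ihl ihr =>
    intro i v off
    obtain ⟨hl, hr, hm, -⟩ := hw
    simp only [updST]
    by_cases hc : i < off + m
    · rw [if_pos hc]
      exact ⟨ihl hl i v off, hr, by rw [hm, updST_toL_length], rfl⟩
    · rw [if_neg hc]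
      exact ⟨hl, ihr hr i v (off + m), hm, rfl⟩

theorem buildST_mnv (k : Nat) : (buildST k).mnv = 0 := by
  rw [buildST]
  split <;> rfl

theorem buildST_toL : ∀ (k : Nat), 1 ≤ k → (buildST k).toL = List.replicate k 0 := by
  intro k
  induction k using Nat.strong_induction_on with
  | _ k ih =>
    intro hk
    rw [buildST]
    by_cases h1 : k ≤ 1
    · rw [if_pos h1]
      have : k = 1 := by omega
      simp [this, ST2.toL]
    · rw [if_neg h1]
      simp only [ST2.toL]
      rw [ih (k / 2) (by omega) (by omega), ih (k - k / 2) (by omega) (by omega)]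
      rw [← List.replicate_add]
      congr 1
      omega

theorem buildST_wf : ∀ (k : Nat), (buildST k).wf := by
  intro k
  induction k using Nat.strong_induction_on with
  | _ k ih =>
    rw [buildST]
    by_cases h1 : k ≤ 1
    · rw [if_pos h1]; trivial
    · rw [if_neg h1]
      refine ⟨ih (k / 2) (by omega), ih (k - k / 2) (by omega), ?_, ?_⟩
      · rw [buildST_toL (k / 2) (by omega)]; simp
      · rw [buildST_mnv, buildST_mnv]; simp

-- ---- bisect ----

theorem bisect_inv (bs : List Int) (w : Int)
    (hmono : ∀ (p q : Nat) (hq : q < bs.length) (hpq : p ≤ q), bs[p]'(by omega) ≤ bs[q]) :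
    ∀ (fuel lo hi : Nat), hi - lo ≤ fuel → lo ≤ hi → hi ≤ bs.length →
    (∀ j (hj : j < bs.length), j < lo → bs[j] < w) →
    (∀ j (hj : j < bs.length), hi ≤ j → w ≤ bs[j]) →
    bisectL bs w lo hi ≤ hi ∧ lo ≤ bisectL bs w lo hi ∧
    (∀ j (hj : j < bs.length), (w ≤ bs[j] ↔ bisectL bs w lo hi ≤ j)) := by
  intro fuel
  induction fuel with
  | zero =>
    intro lo hi hfuel hle hhi hlow hhigh
    have : hi = lo := by omega
    subst this
    rw [bisectL, if_neg (by omega)]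
    refine ⟨le_refl _, le_refl _, ?_⟩
    intro j hj
    constructor
    · intro hwj
      by_contra hc
      exact absurd hwj (not_le.mpr (hlow j hj (by omega)))
    · intro hj2
      exact hhigh j hj hj2
  | succ fuel ih =>
    intro lo hi hfuel hle hhi hlow hhigh
    rw [bisectL]
    by_cases hlt : lo < hi
    · rw [if_pos hlt]
      have hmid : (lo + hi) / 2 < bs.length := by omega
      have hgetD : bs.getD ((lo + hi) / 2) 0 = bs[(lo + hi) / 2] := List.getD_eq_getElem bs 0 hmid
      rw [hgetD]
      by_cases hc : bs[(lo + hi) / 2] < w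
      · rw [if_pos hc]
        have h1 : ∀ j (hj : j < bs.length), j < (lo + hi) / 2 + 1 → bs[j] < w := by
          intro j hj hjm
          calc bs[j] ≤ bs[(lo + hi) / 2] := hmono j _ hmid (by omega)
          _ < w := hc
        have := ih ((lo + hi) / 2 + 1) hi (by omega) (by omega) hhi h1 hhigh
        exact ⟨this.1, by omega, this.2.2⟩
      · rw [if_neg hc]
        rw [not_lt] at hc
        have h2 : ∀ j (hj : j < bs.length), (lo + hi) / 2 ≤ j → w ≤ bs[j] := by
          intro j hj hjm
          exact hc.trans (hmono _ j hj hjm)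
        have := ih lo ((lo + hi) / 2) (by omega) (by omega) (by omega) hlow h2
        exact ⟨by omega, this.2.1, this.2.2⟩
    · rw [if_neg hlt]
      have hlohi : lo = hi := by omega
      refine ⟨by omega, le_refl _, ?_⟩
      intro j hj
      constructor
      · intro hwj
        by_contra hcj
        exact absurd hwj (not_le.mpr (hlow j hj (by omega)))
      · intro hj2
        exact hhigh j hj (by omega)

-- ---- A's inner loop via scanI ----

theorem scanI_eq (w v : Int) : ∀ (bs d : List Int) (off L : Nat), d.length = bs.length →
    (∀ j (hj : j < bs.length), (w ≤ bs[j] ↔ L ≤ off + j)) →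
    scanI bs d w v off = findSpecL d L v off := by
  intro bs
  induction bs with
  | nil =>
    intro d off L hlen _
    have : d = [] := List.eq_nil_of_length_eq_zero (by simpa using hlen)
    subst this
    simp [scanI, findSpecL]
  | cons x bs' ih =>
    intro d off L hlen hiff
    match d with
    | [] => simp at hlen
    | y :: d' =>
      simp only [scanI, findSpecL]
      have h0 : w ≤ x ↔ L ≤ off := by
        have := hiff 0 (by simp)
        simpa using this
      have hcond : (w ≤ x ∧ y < v) ↔ (L ≤ off ∧ y < v) := by rw [h0]
      by_cases hc : L ≤ off ∧ y < v
      · rw [if_pos (hcond.mpr hc), if_pos hc]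
      · rw [if_neg (fun h => hc (hcond.mp h)), if_neg hc]
        apply ih d' (off + 1) L (by simpa using hlen)
        intro j hj
        have := hiff (j + 1) (by simpa using Nat.succ_lt_succ hj)
        simpa [Nat.add_assoc, Nat.add_comm 1 j] using this

theorem fInner_eq (bs : List Int) (w v : Int) : ∀ (fuel i : Nat) (dp : List Int),
    bs.length - i ≤ fuel → dp.length = bs.length + 1 →
    fInner bs w v dp i =
      (if scanI (bs.drop i) (dp.drop (i + 1)) w v i = -1 then dp
       else dp.set ((scanI (bs.drop i) (dp.drop (i + 1)) w v i).toNat + 1) v) := by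
  intro fuel
  induction fuel with
  | zero =>
    intro i dp hfuel hlen
    have hge : ¬ i < bs.length := by omega
    rw [fInner, dif_neg hge]
    rw [List.drop_eq_nil_of_le (by omega)]
    simp [scanI]
  | succ fuel ih =>
    intro i dp hfuel hlen
    rw [fInner]
    by_cases hi : i < bs.length
    · rw [dif_pos hi]
      have hdp : i + 1 < dp.length := by omega
      rw [List.drop_eq_getElem_cons hi, List.drop_eq_getElem_cons hdp]
      simp only [scanI]
      have hgetD : dp.getD (i + 1) 0 = dp[i + 1] := List.getD_eq_getElem dp 0 hdp
      by_cases hc : w ≤ bs[i] ∧ dp[i + 1] < v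
      · rw [if_pos (by rw [hgetD]; exact ⟨hc.1, hc.2⟩), if_pos hc]
        rw [if_neg (by simp), Int.toNat_natCast]
      · rw [if_neg (by rw [hgetD]; exact fun h => hc ⟨h.1, h.2⟩), if_neg hc]
        exact ih (i + 1) dp (by omega) hlen
    · rw [dif_neg hi]
      rw [List.drop_eq_nil_of_le (by omega)]
      simp [scanI]

-- ---- per-item step and the fold ----

theorem step_eq (bs : List Int)
    (hmono : ∀ (p q : Nat) (hq : q < bs.length) (hpq : p ≤ q), bs[p]'(by omega) ≤ bs[q])
    (t : ST2) (w v : Int) (hw : t.wf) (hlen : t.toL.length = bs.length) :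
    (fInner bs w v (0 :: t.toL) 0 =
      0 :: (if bisectL bs w 0 bs.length < bs.length then
              (if findST t (bisectL bs w 0 bs.length) v 0 ≠ -1 then
                 updST t (findST t (bisectL bs w 0 bs.length) v 0).toNat v 0 else t)
            else t).toL) ∧
    (if bisectL bs w 0 bs.length < bs.length then
       (if findST t (bisectL bs w 0 bs.length) v 0 ≠ -1 then
          updST t (findST t (bisectL bs w 0 bs.length) v 0).toNat v 0 else t)
     else t).wf ∧
    (if bisectL bs w 0 bs.length < bs.length then
       (if findST t (bisectL bs w 0 bs.length) v 0 ≠ -1 then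
          updST t (findST t (bisectL bs w 0 bs.length) v 0).toNat v 0 else t)
     else t).toL.length = bs.length := by
  have hbis := bisect_inv bs w hmono (bs.length - 0) 0 bs.length (le_refl _) (by omega) (le_refl _)
    (by intro j hj hj0; omega) (by intro j hj hjn; omega)
  set L := bisectL bs w 0 bs.length with hL
  obtain ⟨hLle, -, hLiff⟩ := hbis
  have hscan : scanI bs t.toL w v 0 = findSpecL t.toL L v 0 := by
    apply scanI_eq w v bs t.toL 0 L hlen
    intro j hj
    simpa using hLiff j hj
  have hA : fInner bs w v (0 :: t.toL) 0 =
      (if findSpecL t.toL L v 0 = -1 then (0 :: t.toL)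
       else (0 :: t.toL).set ((findSpecL t.toL L v 0).toNat + 1) v) := by
    rw [fInner_eq bs w v bs.length 0 (0 :: t.toL) (by omega) (by simp [hlen])]
    simp only [zero_add, List.drop_zero, List.drop_one, List.tail_cons]
    rw [hscan]
  by_cases hLn : L < bs.length
  · rw [if_pos hLn]
    have hfind : findST t L v 0 = findSpecL t.toL L v 0 := findST_eq t hw L v 0
    by_cases hr : findSpecL t.toL L v 0 = -1
    · rw [if_neg (by rw [hfind]; simpa using hr)]
      rw [hA, if_pos hr]
      exact ⟨rfl, hw, hlen⟩
    · rw [if_pos (by rw [hfind]; simpa using hr)]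
      obtain ⟨j, hjlen, hjval⟩ := findSpecL_bounds t.toL L v 0 hr
      simp only [Nat.zero_add] at hjval
      have htoNat : (findST t L v 0).toNat = j := by rw [hfind, hjval, Int.toNat_natCast]
      rw [htoNat]
      have hupd : (updST t j v 0).toL = t.toL.set j v := by
        rw [updST_toL t hw j v 0 (by omega) (by omega)]
        norm_num
      refine ⟨?_, updST_wf t hw j v 0, by rw [updST_toL_length, hlen]⟩
      rw [hA, if_neg hr, hjval, Int.toNat_natCast, hupd]
      rfl
  · rw [if_neg hLn]
    have hLeq : L = bs.length := by omega
    have hr : findSpecL t.toL L v 0 = -1 :=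
      findSpecL_out t.toL L v 0 (by omega)
    rw [hA, if_pos hr]
    exact ⟨rfl, hw, hlen⟩

theorem fold_eq (bs : List Int)
    (hmono : ∀ (p q : Nat) (hq : q < bs.length) (hpq : p ≤ q), bs[p]'(by omega) ≤ bs[q]) :
    ∀ (l : List (Int × Int)) (t : ST2), t.wf → t.toL.length = bs.length →
    l.foldl (fun dp wv => fInner bs wv.1 wv.2 dp 0) (0 :: t.toL) =
      0 :: (l.foldl (fun t wv =>
        if bisectL bs wv.1 0 bs.length < bs.length then
          (if findST t (bisectL bs wv.1 0 bs.length) wv.2 0 ≠ -1 then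
            updST t (findST t (bisectL bs wv.1 0 bs.length) wv.2 0).toNat wv.2 0 else t)
        else t) t).toL ∧
    (l.foldl (fun t wv =>
        if bisectL bs wv.1 0 bs.length < bs.length then
          (if findST t (bisectL bs wv.1 0 bs.length) wv.2 0 ≠ -1 then
            updST t (findST t (bisectL bs wv.1 0 bs.length) wv.2 0).toNat wv.2 0 else t)
        else t) t).wf ∧
    (l.foldl (fun t wv =>
        if bisectL bs wv.1 0 bs.length < bs.length then
          (if findST t (bisectL bs wv.1 0 bs.length) wv.2 0 ≠ -1 then
            updST t (findST t (bisectL bs wv.1 0 bs.length) wv.2 0).toNat wv.2 0 else t)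
        else t) t).toL.length = bs.length := by
  intro l
  induction l with
  | nil => intro t hw hl; exact ⟨rfl, hw, hl⟩
  | cons wv l' ih =>
    intro t hw hl
    obtain ⟨hstep, hw', hl'⟩ := step_eq bs hmono t wv.1 wv.2 hw hl
    simp only [List.foldl_cons]
    rw [hstep]
    exact ih _ hw' hl'

theorem foldl_fInner_nil : ∀ (l : List (Int × Int)) (init : List Int),
    l.foldl (fun dp wv => fInner ([] : List Int) wv.1 wv.2 dp 0) init = init := by
  intro l
  induction l with
  | nil => intro init; rfl
  | cons wv l' ih =>
    intro init
    simp only [List.foldl_cons]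
    rw [fInner, dif_neg (by simp)]
    exact ih init

-- ===== VERDICT (by name: the statement is the Claim_ definition above) =====
theorem f_spec : Claim_equal_f := by
  intro a b _
  show f a b = f_alt a b
  simp only [f, f_alt]
  set bs := PySem.List.sorted b (fun x => x) false with hbs
  have hlenbs : bs.length = b.length := PySem.List.length_sorted b (fun x => x) false
  by_cases hn : bs.length = 0
  · have hbnil : bs = [] := List.eq_nil_of_length_eq_zero hn
    rw [if_pos hn]
    rw [hbnil, foldl_fInner_nil]
    have hb0 : b.length = 0 := by omega
    simp [hb0]
  · rw [if_neg hn]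
    have hmono : ∀ (p q : Nat) (hq : q < bs.length) (hpq : p ≤ q), bs[p]'(by omega) ≤ bs[q] := by
      intro p q hq hpq
      exact PySem.List.sorted_id_getElem_mono b hpq hq
    have hbuildL : (buildST bs.length).toL = List.replicate bs.length 0 :=
      buildST_toL bs.length (by omega)
    have hinit : List.replicate (b.length + 1) (0 : Int) = 0 :: (buildST bs.length).toL := by
      rw [hbuildL, ← hlenbs]
      rfl
    have hfold := fold_eq bs hmono a (buildST bs.length) (buildST_wf bs.length)
      (by rw [hbuildL]; simp)
    rw [hinit, hfold.1, totST_toL]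
    simp
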